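-- pv_equiv track=rewrite | github.com/NanoSekkond/Guias_IP | Python/Ejercicios.py | tres_vocales
-- ===== SOURCE A (Python) =====
-- def pertenece1(s: list, n: int) -> bool:
--     res: bool = False
--     for e in s:
--         if (n == e):
--             res = True
--
--     return res
--
-- def tres_vocales(a: str) -> bool:
--     res: bool = False
--     vocales: list[str] = ['a', 'e', 'i', 'o', 'u']
--     for c in a:
--         if (pertenece1(vocales, c)):
--             vocales.remove(c)
--
--     if (len(vocales) < 3):
--         res = True
--
--     return res
-- ===== SOURCE B (Python) =====
-- def tres_vocales(a: str) -> bool: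
--     return len(set(a) & set('aeiou')) >= 3
-- ===== Notes on version B (the rewrite author's own statement) =====
-- stated objective: simpler
-- what changed: Replaces the shrink-a-mutable-vowel-list loop with its inner membership scan and list.remove by a single set intersection of the string's distinct characters with the vowel set, compared in size to 3.
import Mathlib
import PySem

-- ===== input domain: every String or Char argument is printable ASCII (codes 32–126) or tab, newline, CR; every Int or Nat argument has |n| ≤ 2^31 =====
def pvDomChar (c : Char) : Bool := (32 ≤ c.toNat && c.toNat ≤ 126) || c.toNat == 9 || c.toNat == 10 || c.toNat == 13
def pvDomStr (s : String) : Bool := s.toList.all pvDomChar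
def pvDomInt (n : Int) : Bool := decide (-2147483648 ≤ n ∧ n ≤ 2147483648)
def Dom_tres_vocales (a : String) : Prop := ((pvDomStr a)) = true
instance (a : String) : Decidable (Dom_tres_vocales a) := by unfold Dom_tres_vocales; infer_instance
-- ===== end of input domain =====

-- B replaces A's shrink-a-mutable-vowel-list loop (inner membership scan + list.remove)
-- by a single set intersection: |set(a) & set('aeiou')| >= 3.  Objective: simpler.

-- ===== PORT A =====
def pertenece1 (s : List Char) (n : Char) : Bool :=
  s.foldl (fun res e => if n = e then true else res) false

def tres_vocales (a : String) : Bool :=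
  let vocales : List Char :=
    a.toList.foldl
      (fun vocales c =>
        if pertenece1 vocales c then (PySem.List.remove? vocales c).getD vocales
        else vocales)
      ['a', 'e', 'i', 'o', 'u']
  decide (vocales.length < 3)

-- ===== PORT B =====
def tres_vocales_alt (a : String) : Bool :=
  decide (3 ≤ PySem.Set.len
    (PySem.Set.inter (PySem.Set.ofList a.toList) (PySem.Set.ofList "aeiou".toList)))

-- ===== PRECONDITION & SPEC =====
def Spec_tres_vocales (a : String) (out : Bool) : Prop := out = tres_vocales_alt a
instance (a : String) (out : Bool) : Decidable (Spec_tres_vocales a out) := by unfold Spec_tres_vocales; infer_instance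

-- ===== CLAIM (what is proved, stated in full; the proofs are below) =====
def Claim_equal_tres_vocales : Prop := ∀ (a : String), Dom_tres_vocales a → Spec_tres_vocales a (tres_vocales a)

-- ===== LEMMAS AND PROOFS =====

theorem pertenece1_eq_contains (s : List Char) (n : Char) :
    pertenece1 s n = decide (n ∈ s) := by
  unfold pertenece1
  suffices h : ∀ acc : Bool, s.foldl (fun res e => if n = e then true else res) acc
      = (acc || decide (n ∈ s)) by simpa using h false
  induction s with
  | nil => intro acc; simp
  | cons x xs ih =>
    intro acc
    rw [List.foldl_cons]
    by_cases hx : n = x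
    · rw [if_pos hx, ih true]; simp [hx]
    · rw [if_neg hx, ih acc]; simp [hx]

-- one loop step of A keeps exactly the vowels different from c
theorem step_eq_filter (v : List Char) (c : Char) (hv : v.Nodup) :
    (if pertenece1 v c then (PySem.List.remove? v c).getD v else v)
      = v.filter (fun x => x != c) := by
  by_cases hc : c ∈ v
  · rw [pertenece1_eq_contains]
    simp only [hc, decide_true, if_true,
      PySem.List.remove?_eq_some_erase v c hc, Option.getD_some]
    exact hv.erase_eq_filter c
  · rw [pertenece1_eq_contains]
    simp only [hc, decide_false, Bool.false_eq_true, if_false]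
    exact (List.filter_eq_self.2 (fun x hx => by
      simp only [bne_iff_ne, ne_eq]
      rintro rfl; exact hc hx)).symm

-- A's loop over l, started from any duplicate-free vowel list v, leaves the
-- elements of v that do not occur in l
theorem loopA_eq_filter (l : List Char) :
    ∀ v : List Char, v.Nodup →
      l.foldl (fun vocales c =>
        if pertenece1 vocales c then (PySem.List.remove? vocales c).getD vocales
        else vocales) v
      = v.filter (fun x => decide (x ∉ l)) := by
  induction l with
  | nil => intro v _; simp
  | cons c l ih =>
    intro v hv
    rw [List.foldl_cons, step_eq_filter v c hv,
      ih _ (hv.filter _), List.filter_filter]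
    apply List.filter_congr
    intro x _
    by_cases h : x = c <;> simp [h]

theorem len_inter_eq (a : String) :
    (PySem.Set.inter (PySem.Set.ofList a.toList)
        (PySem.Set.ofList ['a', 'e', 'i', 'o', 'u'])).length
      = ((['a', 'e', 'i', 'o', 'u'] : List Char).filter
          (fun x => decide (x ∈ a.toList))).length := by
  apply List.Perm.length_eq
  rw [List.perm_ext_iff_of_nodup
      (PySem.Set.nodup_inter _ _ (PySem.Set.nodup_ofList _))
      ((by decide : (['a', 'e', 'i', 'o', 'u'] : List Char).Nodup).filter _)]
  intro x
  rw [PySem.Set.mem_inter, PySem.Set.mem_ofList, PySem.Set.mem_ofList,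
    List.mem_filter]
  simp only [decide_eq_true_eq]
  tauto

-- ===== VERDICT (by name: the statement is the Claim_ definition above) =====
theorem tres_vocales_spec : Claim_equal_tres_vocales := by
  intro a _
  unfold Spec_tres_vocales tres_vocales tres_vocales_alt
  rw [loopA_eq_filter _ _ (by decide)]
  have hS : PySem.Set.len
      (PySem.Set.inter (PySem.Set.ofList a.toList)
        (PySem.Set.ofList "aeiou".toList))
      = (((['a', 'e', 'i', 'o', 'u'] : List Char).filter
          (fun x => decide (x ∈ a.toList))).length : Int) := by
    rw [show ("aeiou".toList) = ['a', 'e', 'i', 'o', 'u'] from by decide]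
    simp [PySem.Set.len, len_inter_eq a]
  have hsum := List.length_eq_length_filter_add
    (l := (['a', 'e', 'i', 'o', 'u'] : List Char))
    (fun x => decide (x ∈ a.toList))
  have hneg : ((['a', 'e', 'i', 'o', 'u'] : List Char).filter
        (fun x => decide (x ∉ a.toList)))
      = (['a', 'e', 'i', 'o', 'u'] : List Char).filter
        (fun x => !decide (x ∈ a.toList)) := by simp
  rw [decide_eq_decide, hS, hneg]
  simp only [List.length_cons, List.length_nil] at hsum
  omega
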